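-- pv_equiv track=rewrite | github.com/rdiezlla/market_basket | src/market_basket/mahou_beneficio_layout_actual_2026_v2.py | _count_route_reengagements
-- ===== SOURCE A (Python) =====
-- def _count_route_reengagements(aisle_sequence: list[int]) -> int:
--     if not aisle_sequence:
--         return 0
--     run_counts: dict[int, int] = {}
--     previous = object()
--     for aisle in aisle_sequence:
--         if aisle != previous:
--             run_counts[int(aisle)] = run_counts.get(int(aisle), 0) + 1
--         previous = aisle
--     return int(sum(max(count - 1, 0) for count in run_counts.values()))
-- ===== SOURCE B (Python) =====
-- def _count_route_reengagements(aisle_sequence: list[int]) -> int: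
--     heads = sorted(x for x, prev in zip(aisle_sequence, [None] + aisle_sequence) if x != prev)
--     return sum(1 for a, b in zip(heads, heads[1:]) if a == b)
-- ===== Notes on version B (the rewrite author's own statement) =====
-- stated objective: alternative
-- what changed: B collapses the sequence into its run heads with one zip-with-predecessor comprehension, SORTS the heads, and counts adjacent equal pairs in the sorted list, replacing A's hash-dict frequency accumulation and max(count-1,0) summation with a sort-then-scan that uses no dict or set at all.
import Mathlib
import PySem

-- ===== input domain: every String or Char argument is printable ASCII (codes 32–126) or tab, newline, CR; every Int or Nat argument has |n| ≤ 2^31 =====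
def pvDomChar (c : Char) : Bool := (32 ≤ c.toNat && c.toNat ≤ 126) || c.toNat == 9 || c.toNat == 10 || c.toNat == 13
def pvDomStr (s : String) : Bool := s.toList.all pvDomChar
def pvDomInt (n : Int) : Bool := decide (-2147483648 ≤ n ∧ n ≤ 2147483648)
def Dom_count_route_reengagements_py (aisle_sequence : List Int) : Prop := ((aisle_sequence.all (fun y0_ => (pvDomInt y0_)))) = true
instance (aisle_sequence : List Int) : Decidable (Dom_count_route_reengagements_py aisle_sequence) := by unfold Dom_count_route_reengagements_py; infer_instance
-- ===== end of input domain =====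

-- B collapses the sequence into its run heads via a zip-with-predecessor comprehension,
-- sorts the heads and counts adjacent equal pairs — a sort-then-scan alternative to A's
-- dict-of-counts accumulation and max(count-1,0) summation (objective: alternative).

-- ===== PORT A =====
def count_route_reengagements_py (aisle_sequence : List Int) : Int :=
  if aisle_sequence = [] then 0
  else
    -- previous = object() never equals an int: modelled as Option Int starting at none
    let st := aisle_sequence.foldl
      (fun (st : PySem.Dict Int Int × Option Int) aisle =>
        if some aisle ≠ st.2 then (st.1.insert aisle (st.1.getD aisle 0 + 1), some aisle)
        else (st.1, some aisle))
      (PySem.Dict.empty, none)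
    ((st.1.values.map (fun count => max (count - 1) 0)).sum)

-- ===== PORT B =====
def count_route_reengagements_py_alt (aisle_sequence : List Int) : Int :=
  let heads := PySem.List.sorted
    (((aisle_sequence.zip (none :: aisle_sequence.map some)).filter
        (fun p => !(some p.1 == p.2))).map (·.1))
    (fun x => x) false
  (((heads.zip heads.tail).filter (fun p => p.1 == p.2)).length : Int)

-- ===== PRECONDITION & SPEC =====
def Spec_count_route_reengagements_py (aisle_sequence : List Int) (out : Int) : Prop := out = count_route_reengagements_py_alt aisle_sequence
instance (aisle_sequence : List Int) (out : Int) : Decidable (Spec_count_route_reengagements_py aisle_sequence out) := by unfold Spec_count_route_reengagements_py; infer_instance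

-- ===== CLAIM (what is proved, stated in full; the proofs are below) =====
def Claim_equal_count_route_reengagements_py : Prop := ∀ (aisle_sequence : List Int), Dom_count_route_reengagements_py aisle_sequence → Spec_count_route_reengagements_py aisle_sequence (count_route_reengagements_py aisle_sequence)

-- ===== LEMMAS AND PROOFS =====

/-- The list of run heads of `xs`, given the value standing just before `xs`
(`none` = Python's fresh `object()` / the `[None]` padding). -/
def runsFrom (prev : Option Int) : List Int → List Int
  | [] => []
  | a :: t => if some a = prev then runsFrom (some a) t else a :: runsFrom (some a) t

/-- B's zip-with-predecessor comprehension computes exactly the run heads. -/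
theorem b_runs_eq_runsFrom (xs : List Int) (prev : Option Int) :
    ((xs.zip (prev :: xs.map some)).filter (fun p => !(some p.1 == p.2))).map (·.1)
      = runsFrom prev xs := by
  induction xs generalizing prev with
  | nil => rfl
  | cons a t ih =>
    simp only [List.map_cons, List.zip_cons_cons, List.filter_cons, runsFrom]
    by_cases h : some a = prev
    · simpa [h] using ih prev
    · simpa [h] using ih (some a)

/-- A's dict-accumulating fold is the counter fold over the run heads. -/
theorem a_fold_eq_counter_fold (xs : List Int) (d : PySem.Dict Int Int) (prev : Option Int) :
    (xs.foldl
      (fun (st : PySem.Dict Int Int × Option Int) aisle =>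
        if some aisle ≠ st.2 then (st.1.insert aisle (st.1.getD aisle 0 + 1), some aisle)
        else (st.1, some aisle)) (d, prev)).1
      = (runsFrom prev xs).foldl (fun d x => d.insert x (d.getD x 0 + 1)) d := by
  induction xs generalizing d prev with
  | nil => rfl
  | cons a t ih =>
    simp only [List.foldl_cons, runsFrom]
    by_cases h : some a = prev
    · simpa [h] using ih d prev
    · simpa [h] using ih (d.insert a (d.getD a 0 + 1)) (some a)

theorem sum_map_natCast_count (ws S : List Int) (hnd : S.Nodup)
    (hmem : ∀ x, x ∈ S ↔ x ∈ ws) :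
    (S.map (fun k => (ws.count k : Int))).sum = (ws.length : Int) := by
  have hperm : S.Perm ws.dedup := by
    apply List.perm_of_nodup_nodup_toFinset_eq hnd (List.nodup_dedup ws)
    ext x; simp [hmem x, List.mem_dedup]
  rw [(hperm.map (fun k => (ws.count k : Int))).sum_eq]
  rw [← List.sum_map_count_dedup_eq_length ws]
  rw [Nat.cast_list_sum, List.map_map]
  rfl

/-- The per-key sum of `max(count-1,0)` over the counter of `ws` is
`|ws| - |set(ws)|`. -/
theorem counter_sum_eq (ws : List Int) :
    (((PySem.Dict.counter ws).values).map (fun count => max (count - 1) 0)).sum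
      = (ws.length : Int) - ((PySem.Set.ofList ws).length : Int) := by
  have hv : (PySem.Dict.counter ws).values
      = (PySem.Set.ofList ws).map (fun k => (ws.count k : Int)) := by
    simp [PySem.Dict.values, PySem.Dict.items_counter, List.map_map, Function.comp_def]
  rw [hv, List.map_map]
  have hcongr : ((PySem.Set.ofList ws).map
        ((fun count => max (count - 1) 0) ∘ (fun k => (ws.count k : Int)))).sum
      = ((PySem.Set.ofList ws).map (fun k => (ws.count k : Int) - 1)).sum := by
    apply congrArg
    apply List.map_congr_left
    intro k hk
    have hkws : k ∈ ws := (PySem.Set.mem_ofList ws k).1 hk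
    have h1 : 1 ≤ ws.count k := List.one_le_count_iff.2 hkws
    have : (1 : Int) ≤ (ws.count k : Int) := by exact_mod_cast h1
    simp only [Function.comp]
    omega
  rw [hcongr]
  have hsplit : ((PySem.Set.ofList ws).map (fun k => (ws.count k : Int) - 1)).sum
      = ((PySem.Set.ofList ws).map (fun k => (ws.count k : Int))).sum
        - ((PySem.Set.ofList ws).length : Int) := by
    induction (PySem.Set.ofList ws) with
    | nil => simp
    | cons a t ih => simp [ih]; ring
  rw [hsplit,
    sum_map_natCast_count ws (PySem.Set.ofList ws) (PySem.Set.nodup_ofList ws)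
      (fun x => PySem.Set.mem_ofList ws x)]

/-- In a `≤`-sorted list, (number of adjacent equal pairs) + (number of distinct
values) = length. -/
theorem adj_add_dedup_of_pairwise (l : List Int) (h : l.Pairwise (· ≤ ·)) :
    ((l.zip l.tail).filter (fun p => p.1 == p.2)).length + l.dedup.length
      = l.length := by
  induction l with
  | nil => simp
  | cons a t ih =>
    cases t with
    | nil => simp
    | cons b t' =>
      have hab : a ≤ b := (List.pairwise_cons.1 h).1 b (by simp)
      have ht : (b :: t').Pairwise (· ≤ ·) := (List.pairwise_cons.1 h).2
      have ih' := ih ht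
      simp only [List.tail_cons, List.length_cons] at ih'
      by_cases hEq : a = b
      · subst hEq
        rw [List.dedup_cons_of_mem (by simp : a ∈ a :: t')]
        simp only [List.tail_cons, List.zip_cons_cons, List.filter_cons, beq_self_eq_true,
          if_true, List.length_cons]
        omega
      · have hlt : a < b := lt_of_le_of_ne hab hEq
        have hnmem : a ∉ b :: t' := by
          intro hm
          have : a < a := lt_of_lt_of_le hlt
            (by rcases List.mem_cons.1 hm with h1 | h1
                · exact le_of_eq h1.symm
                · exact (List.pairwise_cons.1 ht).1 a h1)
          exact lt_irrefl a this
        simp only [List.tail_cons, List.zip_cons_cons, List.filter_cons]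
        simp only [List.dedup_cons_of_notMem hnmem]
        simp only [beq_iff_eq, hEq, if_false, List.length_cons]
        omega
      
/-- Two nodup lists with the same members have the same length. -/
theorem length_eq_of_nodup_of_mem_iff (S T : List Int) (hS : S.Nodup) (hT : T.Nodup)
    (hmem : ∀ x, x ∈ S ↔ x ∈ T) : S.length = T.length := by
  have hperm : S.Perm T :=
    List.perm_of_nodup_nodup_toFinset_eq hS hT (by ext x; simp [hmem x])
  exact hperm.length_eq

-- ===== VERDICT (by name: the statement is the Claim_ definition above) =====
theorem count_route_reengagements_py_spec : Claim_equal_count_route_reengagements_py := by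
  intro xs _hdom
  unfold Spec_count_route_reengagements_py
  unfold count_route_reengagements_py count_route_reengagements_py_alt
  simp only [b_runs_eq_runsFrom]
  set ws := runsFrom none xs with hws
  set heads := PySem.List.sorted ws (fun x => x) false with hheads
  have hperm : heads.Perm ws := PySem.List.sorted_perm ws (fun x => x) false
  have hpw : heads.Pairwise (· ≤ ·) := by
    simpa using PySem.List.sorted_pairwise ws (fun x => x)
  have hB : (((heads.zip heads.tail).filter (fun p => p.1 == p.2)).length : Int)
      = (ws.length : Int) - ((PySem.Set.ofList ws).length : Int) := by
    have h1 := adj_add_dedup_of_pairwise heads hpw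
    have h2 : heads.dedup.length = (PySem.Set.ofList ws).length := by
      apply length_eq_of_nodup_of_mem_iff _ _ (List.nodup_dedup heads)
        (PySem.Set.nodup_ofList ws)
      intro x
      rw [List.mem_dedup, hperm.mem_iff, PySem.Set.mem_ofList]
    have h3 : heads.length = ws.length := hperm.length_eq
    omega
  rw [hB]
  by_cases hx : xs = []
  · subst hx; simp [hws, runsFrom]
  · simp only [hx, if_false]
    rw [a_fold_eq_counter_fold]
    rw [PySem.Dict.foldl_insert_getD_add_one_eq_counter]
    exact counter_sum_eq ws
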